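-- pv_equiv track=rewrite | github.com/hwchoi96/coding_test | green_velt.py | get_score_same_shape
-- ===== SOURCE A (Python) =====
-- from itertools import combinations
--
-- def get_score_same_shape(cards):
--     rules = {'S': 0, 'D': 0, 'H': 0, 'C': 0}
--     score = 0
--
--     for card in cards:
--         if card[0] == 'S':
--             rules['S'] += 1
--         elif card[0] == 'D':
--             rules['D'] += 1
--         elif card[0] == 'H':
--             rules['H'] += 1
--         else:
--             rules['C'] += 1
--
--     for rule in rules.values():
--         if rule >= 3:
--             dummy = [i for i in range(rule)]
--
--             for i in range(3, len(dummy) + 1):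
--                 com = list(combinations(dummy, i))
--                 for c in com:
--                     score += (len(c) ** 2)
--
--     return score
-- ===== SOURCE B (Python) =====
-- def get_score_same_shape(cards):
--     def f(n):
--         if n < 3:
--             return 0
--         # sum_{i=0}^n C(n,i)*i^2 = n*(n+1)*2^(n-2); drop the i=0,1,2 terms
--         return n * (n + 1) * 2 ** (n - 2) - 2 * n * (n - 1) - n
--     ns = sum(1 for c in cards if c[0] == 'S')
--     nd = sum(1 for c in cards if c[0] == 'D')
--     nh = sum(1 for c in cards if c[0] == 'H')
--     nc = len(cards) - ns - nd - nh
--     return f(ns) + f(nd) + f(nh) + f(nc)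
-- ===== Notes on version B (the rewrite author's own statement) =====
-- stated objective: faster
-- what changed: Replaces the exponential enumeration of all size>=3 same-suit combinations by the closed form n*(n+1)*2^(n-2) - 2*n*(n-1) - n per suit (from sum C(n,i)*i^2 = n*(n+1)*2^(n-2)), with suit counts taken by simple per-suit passes instead of a dict of branches.
import Mathlib
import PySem

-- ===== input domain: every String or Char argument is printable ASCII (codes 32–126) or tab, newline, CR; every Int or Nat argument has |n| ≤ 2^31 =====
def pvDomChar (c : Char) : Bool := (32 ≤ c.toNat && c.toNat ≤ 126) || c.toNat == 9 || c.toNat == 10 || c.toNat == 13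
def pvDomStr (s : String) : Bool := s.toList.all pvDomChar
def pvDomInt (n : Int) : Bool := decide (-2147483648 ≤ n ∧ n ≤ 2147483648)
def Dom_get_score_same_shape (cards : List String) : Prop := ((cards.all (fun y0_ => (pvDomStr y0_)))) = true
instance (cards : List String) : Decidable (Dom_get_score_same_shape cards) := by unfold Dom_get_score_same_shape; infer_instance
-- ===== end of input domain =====

-- B replaces A's exponential enumeration of same-suit combinations by a closed form per suit; objective: faster.

-- ===== PORT A =====
-- itertools.combinations(l, k) in lexicographic order (exact: same elements, same order)
def pvCombos (l : List Int) (k : Nat) : List (List Int) :=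
  match l, k with
  | _, 0 => [[]]
  | [], _ + 1 => []
  | x :: xs, n + 1 => (pvCombos xs n).map (fun c => x :: c) ++ pvCombos xs (n + 1)

-- one iteration of A's counting loop (card[0] via pyGet?; outside Pre_ an empty card
-- raises IndexError in Python, here it falls to the final else)
def pvSuitStep (d : PySem.Dict String Int) (card : String) : PySem.Dict String Int :=
  if PySem.Str.pyGet? card 0 == some 'S' then d.modify "S" 0 (· + 1)
  else if PySem.Str.pyGet? card 0 == some 'D' then d.modify "D" 0 (· + 1)
  else if PySem.Str.pyGet? card 0 == some 'H' then d.modify "H" 0 (· + 1)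
  else d.modify "C" 0 (· + 1)

def get_score_same_shape (cards : List String) : Int :=
  let rules := cards.foldl pvSuitStep
    (PySem.Dict.ofList [("S", (0 : Int)), ("D", 0), ("H", 0), ("C", 0)])
  rules.values.foldl (fun score rule =>
    if rule ≥ 3 then
      let dummy := PySem.List.pyRange 0 rule 1
      (PySem.List.pyRange 3 ((dummy.length : Int) + 1) 1).foldl (fun score i =>
        (pvCombos dummy i.toNat).foldl (fun score c => score + ((c.length : Int)) ^ 2) score)
        score
    else score) 0

-- ===== PORT B =====
def pvClosedScore (n : Int) : Int :=
  if n < 3 then 0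
  else n * (n + 1) * 2 ^ ((n - 2).toNat) - 2 * n * (n - 1) - n

def get_score_same_shape_alt (cards : List String) : Int :=
  let ns : Int := cards.countP (fun c => PySem.Str.pyGet? c 0 == some 'S')
  let nd : Int := cards.countP (fun c => PySem.Str.pyGet? c 0 == some 'D')
  let nh : Int := cards.countP (fun c => PySem.Str.pyGet? c 0 == some 'H')
  let nc : Int := (cards.length : Int) - ns - nd - nh
  pvClosedScore ns + pvClosedScore nd + pvClosedScore nh + pvClosedScore nc

-- ===== PRECONDITION & SPEC =====
-- Pre_ excludes lists containing an empty string: there card[0] raises IndexError in A (and in B).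
def Pre_get_score_same_shape (cards : List String) : Prop := ∀ s ∈ cards, s ≠ ""
instance (cards : List String) : Decidable (Pre_get_score_same_shape cards) := by
  unfold Pre_get_score_same_shape; infer_instance

def pvWitness_get_score_same_shape : List String := ["S1", "S2", "S3", "S4", "D1"]

def Spec_get_score_same_shape (cards : List String) (out : Int) : Prop := out = get_score_same_shape_alt cards
instance (cards : List String) (out : Int) : Decidable (Spec_get_score_same_shape cards out) := by unfold Spec_get_score_same_shape; infer_instance

-- ===== CLAIM (what is proved, stated in full; the proofs are below) =====
def Claim_equal_get_score_same_shape : Prop := ∀ (cards : List String), Dom_get_score_same_shape cards → Pre_get_score_same_shape cards → Spec_get_score_same_shape cards (get_score_same_shape cards)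

-- ===== LEMMAS AND PROOFS =====

-- every member of pvCombos l k has length k
theorem pvCombos_mem_length : ∀ (l : List Int) (k : Nat) (c : List Int),
    c ∈ pvCombos l k → c.length = k := by
  intro l
  induction l with
  | nil =>
      intro k c hc
      cases k <;> simp [pvCombos] at hc <;> simp [hc]
  | cons x xs ih =>
      intro k c hc
      cases k with
      | zero => simp [pvCombos] at hc; simp [hc]
      | succ n =>
          simp [pvCombos] at hc
          rcases hc with ⟨c', hc', rfl⟩ | hc
          · simp [ih n c' hc']
          · exact ih (n + 1) c hc

-- pvCombos has C(|l|, k) members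
theorem pvCombos_length : ∀ (l : List Int) (k : Nat),
    (pvCombos l k).length = Nat.choose l.length k := by
  intro l
  induction l with
  | nil => intro k; cases k <;> simp [pvCombos]
  | cons x xs ih =>
      intro k
      cases k with
      | zero => simp [pvCombos]
      | succ n => simp [pvCombos, ih, Nat.choose_succ_succ]

-- the inner fold over the combinations of range(m) adds C(m, k) * k^2
theorem pvInner_fold (m : Nat) (k : Nat) (s : Int) :
    (pvCombos (PySem.List.pyRange 0 (m : Int) 1) k).foldl
        (fun score c => score + ((c.length : Int)) ^ 2) s
      = s + (Nat.choose m k : Int) * (k : Int) ^ 2 := by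
  rw [PySem.List.foldl_add]
  have hmap : (pvCombos (PySem.List.pyRange 0 (m : Int) 1) k).map
      (fun c => ((c.length : Int)) ^ 2)
      = (pvCombos (PySem.List.pyRange 0 (m : Int) 1) k).map (fun _ => ((k : Int)) ^ 2) := by
    apply List.map_congr_left
    intro c hc
    rw [pvCombos_mem_length _ _ _ hc]
  rw [hmap, PySem.List.sum_map_const_int, pvCombos_length]
  have hlen : (PySem.List.pyRange 0 (m : Int) 1).length = m := by
    rw [PySem.List.length_pyRange_one]; simp
  rw [hlen]

-- Nat binomial sums: ∑ i*C(n,i) and ∑ i²*C(n,i)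
def pvS1 (n : Nat) : Nat := ∑ i ∈ Finset.range (n + 1), i * Nat.choose n i
def pvS2 (n : Nat) : Nat := ∑ i ∈ Finset.range (n + 1), i ^ 2 * Nat.choose n i

theorem pvChooseStep (n k : Nat) :
    (k + 1) * Nat.choose (n + 1) (k + 1) = (n + 1) * Nat.choose n k := by
  rw [mul_comm]; exact (Nat.add_one_mul_choose_eq n k).symm

theorem pvS1_succ (n : Nat) : pvS1 (n + 1) = (n + 1) * 2 ^ n := by
  unfold pvS1
  rw [Finset.sum_range_succ']
  simp only [Nat.zero_mul, Nat.add_zero]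
  rw [Finset.sum_congr rfl (fun i _ => pvChooseStep n i), ← Finset.mul_sum, Nat.sum_range_choose]

theorem pvS2_succ (n : Nat) : pvS2 (n + 1) = (n + 1) * (pvS1 n + 2 ^ n) := by
  unfold pvS2
  rw [Finset.sum_range_succ']
  rw [show (0 : Nat) ^ 2 * Nat.choose (n + 1) 0 = 0 by norm_num, Nat.add_zero]
  have h : ∀ i, (i + 1) ^ 2 * Nat.choose (n + 1) (i + 1)
      = (n + 1) * (i * Nat.choose n i + Nat.choose n i) := by
    intro k
    calc (k + 1) ^ 2 * Nat.choose (n + 1) (k + 1)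
        = (k + 1) * ((k + 1) * Nat.choose (n + 1) (k + 1)) := by ring
      _ = (k + 1) * ((n + 1) * Nat.choose n k) := by rw [pvChooseStep]
      _ = (n + 1) * (k * Nat.choose n k + Nat.choose n k) := by ring
  rw [Finset.sum_congr rfl (fun i _ => h i), ← Finset.mul_sum, Finset.sum_add_distrib,
    Nat.sum_range_choose]
  rfl

theorem pvS2_closed (t : Nat) : pvS2 (t + 3) = (t + 3) * (t + 4) * 2 ^ (t + 1) := by
  have h2 : t + 3 = (t + 2) + 1 := rfl
  rw [h2, pvS2_succ, pvS1_succ]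
  ring

theorem pvChoose_two (n : Nat) : 4 * Nat.choose n 2 = 2 * (n * (n - 1)) := by
  induction n with
  | zero => rfl
  | succ m ih =>
      rw [Nat.choose_succ_succ, Nat.choose_one_right]
      simp only [show Nat.succ 1 = 2 from rfl]
      have hr : 2 * ((m + 1) * (m + 1 - 1)) = 4 * m + 2 * (m * (m - 1)) := by
        cases m with
        | zero => rfl
        | succ p => simp only [Nat.add_sub_cancel]; ring
      omega

-- the i ≥ 3 tail of pvS2, as a Nat identity without subtraction
theorem pvTail_sum (t : Nat) :
    (∑ k ∈ Finset.range (t + 1), (k + 3) ^ 2 * Nat.choose (t + 3) (k + 3))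
      + ((t + 3) + 2 * ((t + 3) * (t + 2)))
      = (t + 3) * (t + 4) * 2 ^ (t + 1) := by
  have hsplit : pvS2 (t + 3)
      = (∑ i ∈ Finset.range 3, i ^ 2 * Nat.choose (t + 3) i)
        + ∑ k ∈ Finset.range (t + 1), (3 + k) ^ 2 * Nat.choose (t + 3) (3 + k) := by
    unfold pvS2
    have h : t + 3 + 1 = 3 + (t + 1) := by omega
    rw [h, Finset.sum_range_add]
  have hlow : (∑ i ∈ Finset.range 3, i ^ 2 * Nat.choose (t + 3) i)
      = (t + 3) + 4 * Nat.choose (t + 3) 2 := by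
    rw [Finset.sum_range_succ, Finset.sum_range_succ, Finset.sum_range_succ,
      Finset.sum_range_zero, Nat.choose_one_right]
    ring
  have hc2 : 4 * Nat.choose (t + 3) 2 = 2 * ((t + 3) * (t + 2)) := by
    have := pvChoose_two (t + 3)
    simpa using this
  have hcomm : (∑ k ∈ Finset.range (t + 1), (3 + k) ^ 2 * Nat.choose (t + 3) (3 + k))
      = ∑ k ∈ Finset.range (t + 1), (k + 3) ^ 2 * Nat.choose (t + 3) (k + 3) :=
    Finset.sum_congr rfl (fun k _ => by rw [Nat.add_comm 3 k])
  have hclosed := pvS2_closed t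
  omega

-- A's per-suit contribution (pure form of the loop body)
def pvSuitA (rule : Int) : Int :=
  if rule ≥ 3 then
    (PySem.List.pyRange 3 (((PySem.List.pyRange 0 rule 1).length : Int) + 1) 1).foldl
      (fun score i =>
        (pvCombos (PySem.List.pyRange 0 rule 1) i.toNat).foldl
          (fun score c => score + ((c.length : Int)) ^ 2) score) 0
  else 0

-- the outer-loop body threads its accumulator additively
theorem pvBody_add (score rule : Int) :
    (if rule ≥ 3 then
      (PySem.List.pyRange 3 (((PySem.List.pyRange 0 rule 1).length : Int) + 1) 1).foldl
        (fun score i =>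
          (pvCombos (PySem.List.pyRange 0 rule 1) i.toNat).foldl
            (fun score c => score + ((c.length : Int)) ^ 2) score) score
     else score)
    = score + pvSuitA rule := by
  unfold pvSuitA
  split_ifs with h
  · have hshift : ∀ (k : Nat) (s : Int),
        (pvCombos (PySem.List.pyRange 0 rule 1) k).foldl
            (fun score c => score + ((c.length : Int)) ^ 2) s
          = s + (pvCombos (PySem.List.pyRange 0 rule 1) k).foldl
            (fun score c => score + ((c.length : Int)) ^ 2) 0 := by
      intro k s
      rw [PySem.List.foldl_add, PySem.List.foldl_add]; ring
    generalize (PySem.List.pyRange 3 (((PySem.List.pyRange 0 rule 1).length : Int) + 1) 1) = L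
    induction L generalizing score with
    | nil => simp
    | cons i L ih =>
        simp only [List.foldl_cons]
        rw [ih, hshift i.toNat score,
          ih ((pvCombos (PySem.List.pyRange 0 rule 1) i.toNat).foldl
            (fun score c => score + ((c.length : Int)) ^ 2) 0)]
        ring
  · ring

-- sum of a map over pyRange 3 (t+4) as a Finset sum
theorem pvMapSum (t : Nat) (g : Int → Int) :
    ((PySem.List.pyRange 3 ((t : Int) + 4) 1).map g).sum
      = ∑ k ∈ Finset.range (t + 1), g ((k : Int) + 3) := by
  induction t with
  | zero =>
      have h4 : (((0 : Nat) : Int) + 4) = 3 + 1 := by norm_num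
      rw [h4, PySem.List.pyRange_one_singleton]
      simp
  | succ u ih =>
      have h5 : (((u + 1 : Nat) : Int) + 4) = ((u : Int) + 4) + 1 := by push_cast; ring
      rw [h5, PySem.List.pyRange_one_succ_right (by omega), List.map_append, List.sum_append,
        Finset.sum_range_succ, ih]
      simp only [List.map_cons, List.map_nil, List.sum_cons, List.sum_nil, Int.add_zero]
      have : ((u : Int) + 4) = ((u + 1 : Nat) : Int) + 3 := by push_cast; ring
      rw [this]

-- pvSuitA of a Nat count equals the closed form B uses
theorem pvSuitA_closed (m : Nat) : pvSuitA (m : Int) = pvClosedScore (m : Int) := by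
  unfold pvSuitA pvClosedScore
  by_cases hm : m < 3
  · rw [if_neg (by omega), if_pos (by omega)]
  · obtain ⟨t, rfl⟩ : ∃ t, m = t + 3 := ⟨m - 3, by omega⟩
    rw [if_pos (by push_cast; omega), if_neg (by push_cast; omega)]
    have hlen : ((PySem.List.pyRange 0 ((t + 3 : Nat) : Int) 1).length : Int)
        = ((t + 3 : Nat) : Int) := by
      rw [PySem.List.length_pyRange_one]
      push_cast
      omega
    rw [hlen]
    have hfun : (fun (score : Int) (i : Int) =>
        (pvCombos (PySem.List.pyRange 0 ((t + 3 : Nat) : Int) 1) i.toNat).foldl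
          (fun score c => score + ((c.length : Int)) ^ 2) score)
        = fun (score : Int) (i : Int) =>
            score + (Nat.choose (t + 3) i.toNat : Int) * ((i.toNat : Nat) : Int) ^ 2 :=
      funext fun s => funext fun i => pvInner_fold (t + 3) i.toNat s
    rw [hfun, PySem.List.foldl_add]
    have hb : ((t + 3 : Nat) : Int) + 1 = (t : Int) + 4 := by push_cast; ring
    rw [hb, pvMapSum]
    have hsum : (∑ k ∈ Finset.range (t + 1),
          (Nat.choose (t + 3) ((k : Int) + 3).toNat : Int) * ((((k : Int) + 3).toNat : Nat) : Int) ^ 2)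
        = ((∑ k ∈ Finset.range (t + 1), (k + 3) ^ 2 * Nat.choose (t + 3) (k + 3) : Nat) : Int) := by
      push_cast
      refine Finset.sum_congr rfl (fun k _ => ?_)
      have h3 : ((k : Int) + 3).toNat = k + 3 := by omega
      rw [h3]
      push_cast
      ring
    rw [hsum]
    have hT : ((∑ k ∈ Finset.range (t + 1), (k + 3) ^ 2 * Nat.choose (t + 3) (k + 3) : Nat) : Int)
        + (((t : Int) + 3) + 2 * (((t : Int) + 3) * ((t : Int) + 2)))
        = ((t : Int) + 3) * ((t : Int) + 4) * 2 ^ (t + 1) := by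
      exact_mod_cast congrArg (Nat.cast : Nat → Int) (pvTail_sum t)
    have htn : (((t + 3 : Nat) : Int) - 2).toNat = t + 1 := by omega
    rw [htn]
    push_cast at hT ⊢
    linear_combination hT

-- the counting loop, computed per key from an arbitrary literal start dict
theorem pvCount_dict_gen : ∀ (cards : List String) (a b c d : Int),
    (cards.foldl pvSuitStep (PySem.Dict.mk [("S", a), ("D", b), ("H", c), ("C", d)])).values
    = [a + ((cards.countP (fun s => PySem.Str.pyGet? s 0 == some 'S') : Nat) : Int),
       b + ((cards.countP (fun s => PySem.Str.pyGet? s 0 == some 'D') : Nat) : Int),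
       c + ((cards.countP (fun s => PySem.Str.pyGet? s 0 == some 'H') : Nat) : Int),
       d + ((cards.countP (fun s => PySem.Str.pyGet? s 0 != some 'S'
          && PySem.Str.pyGet? s 0 != some 'D'
          && PySem.Str.pyGet? s 0 != some 'H') : Nat) : Int)] := by
  intro cards
  induction cards with
  | nil => intro a b c d; simp [PySem.Dict.values]
  | cons x xs ih =>
      intro a b c d
      simp only [List.foldl_cons, List.countP_cons]
      by_cases hS : PySem.List.pyGet? x.toList 0 = some 'S'
      · rw [show pvSuitStep (PySem.Dict.mk [("S", a), ("D", b), ("H", c), ("C", d)]) x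
            = PySem.Dict.mk [("S", a + 1), ("D", b), ("H", c), ("C", d)] by
          simp [pvSuitStep, hS, PySem.Dict.modify, PySem.Dict.contains, PySem.Dict.insert,
            PySem.Dict.getD, PySem.Dict.get?]]
        rw [ih]
        simp [hS]
        ring
      · by_cases hD : PySem.List.pyGet? x.toList 0 = some 'D'
        · rw [show pvSuitStep (PySem.Dict.mk [("S", a), ("D", b), ("H", c), ("C", d)]) x
              = PySem.Dict.mk [("S", a), ("D", b + 1), ("H", c), ("C", d)] by
            simp [pvSuitStep, hD, PySem.Dict.modify, PySem.Dict.contains,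
              PySem.Dict.insert, PySem.Dict.getD, PySem.Dict.get?]]
          rw [ih]
          simp [hD]
          ring
        · by_cases hH : PySem.List.pyGet? x.toList 0 = some 'H'
          · rw [show pvSuitStep (PySem.Dict.mk [("S", a), ("D", b), ("H", c), ("C", d)]) x
                = PySem.Dict.mk [("S", a), ("D", b), ("H", c + 1), ("C", d)] by
              simp [pvSuitStep, hH, PySem.Dict.modify, PySem.Dict.contains,
                PySem.Dict.insert, PySem.Dict.getD, PySem.Dict.get?]]
            rw [ih]
            simp [hH]
            ring
          · rw [show pvSuitStep (PySem.Dict.mk [("S", a), ("D", b), ("H", c), ("C", d)]) x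
                = PySem.Dict.mk [("S", a), ("D", b), ("H", c), ("C", d + 1)] by
              simp [pvSuitStep, hS, hD, hH, PySem.Dict.modify, PySem.Dict.contains,
                PySem.Dict.insert, PySem.Dict.getD, PySem.Dict.get?]]
            rw [ih]
            simp [hS, hD, hH]
            ring

-- the four counts partition the list
theorem pvCounts_partition (cards : List String) :
    cards.countP (fun s => PySem.Str.pyGet? s 0 == some 'S')
    + cards.countP (fun s => PySem.Str.pyGet? s 0 == some 'D')
    + cards.countP (fun s => PySem.Str.pyGet? s 0 == some 'H')
    + cards.countP (fun s => PySem.Str.pyGet? s 0 != some 'S'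
        && PySem.Str.pyGet? s 0 != some 'D'
        && PySem.Str.pyGet? s 0 != some 'H')
    = cards.length := by
  induction cards with
  | nil => rfl
  | cons x xs ih =>
      simp only [List.countP_cons, List.length_cons]
      by_cases hS : PySem.List.pyGet? x.toList 0 = some 'S' <;>
        by_cases hD : PySem.List.pyGet? x.toList 0 = some 'D' <;>
          by_cases hH : PySem.List.pyGet? x.toList 0 = some 'H' <;>
            (simp [hS, hD, hH]; simp at ih; omega)

-- the literal start dict of A's loop
theorem pvOfList_mk (a b c d : Int) :
    PySem.Dict.ofList [("S", a), ("D", b), ("H", c), ("C", d)]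
      = PySem.Dict.mk [("S", a), ("D", b), ("H", c), ("C", d)] := by
  simp [PySem.Dict.ofList, PySem.Dict.update, PySem.Dict.empty, PySem.Dict.insert,
    PySem.Dict.contains]

-- ===== VERDICT (by name: the statement is the Claim_ definition above) =====
theorem get_score_same_shape_spec : Claim_equal_get_score_same_shape := by
  intro cards _ _
  unfold Spec_get_score_same_shape get_score_same_shape get_score_same_shape_alt
  simp only [pvOfList_mk, pvCount_dict_gen, Int.zero_add, List.foldl_cons, List.foldl_nil,
    pvBody_add]
  rw [pvSuitA_closed, pvSuitA_closed, pvSuitA_closed, pvSuitA_closed]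
  have hpart := pvCounts_partition cards
  have hnc : ((cards.length : Int)
      - ((cards.countP (fun s => PySem.Str.pyGet? s 0 == some 'S') : Nat) : Int)
      - ((cards.countP (fun s => PySem.Str.pyGet? s 0 == some 'D') : Nat) : Int)
      - ((cards.countP (fun s => PySem.Str.pyGet? s 0 == some 'H') : Nat) : Int))
      = ((cards.countP (fun s => PySem.Str.pyGet? s 0 != some 'S'
          && PySem.Str.pyGet? s 0 != some 'D'
          && PySem.Str.pyGet? s 0 != some 'H') : Nat) : Int) := by
    push_cast at hpart ⊢
    omega
  rw [hnc]
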